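-- pv_equiv track=rewrite | github.com/kyleyarwood/advent-of-code | 2015/day15/day15.py | get_best_recipe
-- ===== SOURCE A (Python) =====
-- def is_five_hundred_calories(recipe_map, recipe_amounts):
--     calories = sum([recipe_amounts[recipe]*recipe_map[recipe][4] for recipe in recipe_map.keys()])
--     return calories == 500
--
-- def get_score(recipe_map, recipe_amounts, five_hundred_calories):
--     score = 1
--     for i in range(4):
--         score *= max(0, sum([recipe_amounts[recipe]*recipe_map[recipe][i] for recipe in recipe_map.keys()]))
--
--     if not five_hundred_calories or is_five_hundred_calories(recipe_map, recipe_amounts):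
--         return score
--     return 0
--
-- def get_best_recipe(recipe_map, recipes_remaining, recipe_amounts, five_hundred_calories = False, teaspoons_left = 100):
--     if len(recipes_remaining) == 1:
--         recipe_amounts[recipes_remaining[0]] = teaspoons_left
--         return get_score(recipe_map, recipe_amounts, five_hundred_calories)
--
--     max_score = None
--
--     for i in range(teaspoons_left + 1):
--         recipe_amounts[recipes_remaining[0]] = i
--         if max_score is None:
--             max_score = get_best_recipe(recipe_map, recipes_remaining[1:], recipe_amounts, five_hundred_calories, teaspoons_left - i)
--         else:
--             max_score = max(max_score, get_best_recipe(recipe_map, recipes_remaining[1:], recipe_amounts, five_hundred_calories, teaspoons_left - i))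
--
--     return max_score
-- ===== SOURCE B (Python) =====
-- def is_five_hundred_calories(recipe_map, recipe_amounts):
--     calories = sum([recipe_amounts[recipe]*recipe_map[recipe][4] for recipe in recipe_map.keys()])
--     return calories == 500
--
-- def get_score(recipe_map, recipe_amounts, five_hundred_calories):
--     score = 1
--     for i in range(4):
--         score *= max(0, sum([recipe_amounts[recipe]*recipe_map[recipe][i] for recipe in recipe_map.keys()]))
--
--     if not five_hundred_calories or is_five_hundred_calories(recipe_map, recipe_amounts):
--         return score
--     return 0
--
-- def _allocations(names, teaspoons):
--     """All ways to split `teaspoons` over `names`: every name except the last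
--     gets a non-negative amount, the last gets the remainder."""
--     if len(names) == 1:
--         return [[(names[0], teaspoons)]]
--     head, rest = names[0], names[1:]
--     return [[(head, i)] + tail
--             for i in range(teaspoons + 1)
--             for tail in _allocations(rest, teaspoons - i)]
--
-- def get_best_recipe(recipe_map, recipes_remaining, recipe_amounts, five_hundred_calories = False, teaspoons_left = 100):
--     best = None
--     for alloc in _allocations(recipes_remaining, teaspoons_left):
--         amounts = dict(recipe_amounts)
--         amounts.update(alloc)
--         score = get_score(recipe_map, amounts, five_hundred_calories)
--         best = score if best is None else max(best, score)
--     return best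
-- ===== Notes on version B (the rewrite author's own statement) =====
-- stated objective: alternative
-- what changed: B separates enumeration from evaluation: a pure helper materialises the list of all teaspoon allocations (compositions of teaspoons_left) and get_best_recipe folds max over their scores on a fresh dict per allocation, instead of A's recursion that interleaves dict mutation, recursive calls and the running max; B does not mutate recipe_amounts (return values agree everywhere in Pre_).
-- outside the precondition, e.g. on get_best_recipe({}, ['a', 'b'], {}, False, -1): A returns None, B returns None; on get_best_recipe({}, [], {}, False, -1): A returns None, B raises IndexError
import Mathlib
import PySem

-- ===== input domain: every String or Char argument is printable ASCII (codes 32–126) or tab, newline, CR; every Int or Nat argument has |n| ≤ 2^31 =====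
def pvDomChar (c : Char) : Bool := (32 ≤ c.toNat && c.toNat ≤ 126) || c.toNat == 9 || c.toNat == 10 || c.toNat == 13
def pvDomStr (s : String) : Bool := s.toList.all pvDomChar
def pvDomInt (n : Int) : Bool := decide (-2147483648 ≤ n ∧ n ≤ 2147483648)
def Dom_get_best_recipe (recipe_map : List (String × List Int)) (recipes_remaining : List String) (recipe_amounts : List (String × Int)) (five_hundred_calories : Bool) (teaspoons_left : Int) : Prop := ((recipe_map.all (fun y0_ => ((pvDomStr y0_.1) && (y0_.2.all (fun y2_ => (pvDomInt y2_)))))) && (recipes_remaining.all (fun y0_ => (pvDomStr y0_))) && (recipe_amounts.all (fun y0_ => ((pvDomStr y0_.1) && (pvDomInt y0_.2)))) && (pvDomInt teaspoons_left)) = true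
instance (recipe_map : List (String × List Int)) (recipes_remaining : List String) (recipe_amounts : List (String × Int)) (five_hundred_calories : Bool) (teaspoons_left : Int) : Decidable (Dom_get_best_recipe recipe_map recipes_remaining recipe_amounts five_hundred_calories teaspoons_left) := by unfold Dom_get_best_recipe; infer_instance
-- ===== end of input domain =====

-- B separates enumeration from evaluation: it materialises the list of all teaspoon
-- allocations and folds max over their scores, instead of A's recursion that interleaves
-- dict mutation, recursion and max (objective: alternative decomposition, same cost).
-- Python A mutates recipe_amounts in place and B does not; the equivalence proved here is
-- about the RETURN value only.  Dicts are modelled functionally (PySem.Dict).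

-- ===== PORT A =====
-- sum([recipe_amounts[recipe]*recipe_map[recipe][i] for recipe in recipe_map.keys()])
-- (the comprehension appears twice in the Python module; factored as one helper)
def ingSum (m : PySem.Dict String (List Int)) (amts : PySem.Dict String Int) (i : Int) : Int :=
  ((PySem.Dict.keys m).map
    (fun k => PySem.Dict.getD amts k 0 * PySem.List.pyGetD (PySem.Dict.getD m k []) i 0)).sum

def is_five_hundred_calories (m : PySem.Dict String (List Int)) (amts : PySem.Dict String Int) : Bool :=
  ingSum m amts 4 == 500

def get_score (m : PySem.Dict String (List Int)) (amts : PySem.Dict String Int) (flag : Bool) : Int :=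
  let score := (PySem.List.pyRange 0 4 1).foldl (fun sc i => sc * max 0 (ingSum m amts i)) 1
  if !flag || is_five_hundred_calories m amts then score else 0

-- "max_score = rec if max_score is None else max(max_score, rec)" (the some/none branch;
-- the (some, none) case is unreachable in both programs)
def optMax (acc s : Option Int) : Option Int :=
  match acc, s with
  | none, s => s
  | some a, some b => some (max a b)
  | some a, none => some a

-- A's recursion; names = [] is Python's IndexError / None return, outside Pre_
def gbrA (m : PySem.Dict String (List Int)) (flag : Bool) :
    List String → PySem.Dict String Int → Int → Option Int
  | [], _, _ => none
  | [x], amts, t => some (get_score m (amts.insert x t) flag)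
  | x :: y :: rest, amts, t =>
      (PySem.List.pyRange 0 (t + 1) 1).foldl
        (fun acc i => optMax acc (gbrA m flag (y :: rest) (amts.insert x i) (t - i))) none

def get_best_recipe (recipe_map : List (String × List Int)) (recipes_remaining : List String) (recipe_amounts : List (String × Int)) (five_hundred_calories : Bool) (teaspoons_left : Int) : Int :=
  (gbrA (PySem.Dict.mk recipe_map) five_hundred_calories recipes_remaining
      (PySem.Dict.mk recipe_amounts) teaspoons_left).getD 0

-- ===== PORT B =====
-- _allocations; names = [] is Python's IndexError, outside Pre_
def allocations : List String → Int → List (List (String × Int))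
  | [], _ => []
  | [x], t => [[(x, t)]]
  | x :: y :: rest, t =>
      (PySem.List.pyRange 0 (t + 1) 1).flatMap
        (fun i => (allocations (y :: rest) (t - i)).map (fun tail => (x, i) :: tail))

def bestB (m : PySem.Dict String (List Int)) (flag : Bool) (names : List String)
    (amts : PySem.Dict String Int) (t : Int) : Option Int :=
  (allocations names t).foldl
    (fun best alloc =>
      optMax best (some (get_score m (alloc.foldl (fun d p => d.insert p.1 p.2) amts) flag)))
    none

def get_best_recipe_alt (recipe_map : List (String × List Int)) (recipes_remaining : List String) (recipe_amounts : List (String × Int)) (five_hundred_calories : Bool) (teaspoons_left : Int) : Int :=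
  (bestB (PySem.Dict.mk recipe_map) five_hundred_calories recipes_remaining
      (PySem.Dict.mk recipe_amounts) teaspoons_left).getD 0

-- ===== PRECONDITION & SPEC =====
-- Pre_ excludes exactly the inputs on which Python A does not return an int: empty
-- recipes_remaining (IndexError, or None when teaspoons_left < 0), teaspoons_left < 0 with
-- two or more recipes (A returns None), a recipe_map key never given an amount (KeyError),
-- a property list shorter than Python reads (IndexError); the two Nodup conjuncts only
-- discard Lean association lists that no Python dict input can denote.
def Pre_get_best_recipe (recipe_map : List (String × List Int)) (recipes_remaining : List String) (recipe_amounts : List (String × Int)) (five_hundred_calories : Bool) (teaspoons_left : Int) : Prop :=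
  recipes_remaining ≠ [] ∧
  (recipes_remaining.length = 1 ∨ 0 ≤ teaspoons_left) ∧
  (∀ p ∈ recipe_map, p.1 ∈ recipes_remaining ∨ p.1 ∈ recipe_amounts.map Prod.fst) ∧
  (∀ p ∈ recipe_map, 4 ≤ p.2.length) ∧
  (five_hundred_calories = true → ∀ p ∈ recipe_map, 5 ≤ p.2.length) ∧
  (recipe_map.map Prod.fst).Nodup ∧ (recipe_amounts.map Prod.fst).Nodup
instance (recipe_map : List (String × List Int)) (recipes_remaining : List String) (recipe_amounts : List (String × Int)) (five_hundred_calories : Bool) (teaspoons_left : Int) : Decidable (Pre_get_best_recipe recipe_map recipes_remaining recipe_amounts five_hundred_calories teaspoons_left) := by unfold Pre_get_best_recipe; infer_instance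

def pvWitness_get_best_recipe : (List (String × List Int)) × List String × (List (String × Int)) × Bool × Int :=
  ([("a", [1, 2, 3, 4, 5])], ["a", "b"], [], false, 3)

def Spec_get_best_recipe (recipe_map : List (String × List Int)) (recipes_remaining : List String) (recipe_amounts : List (String × Int)) (five_hundred_calories : Bool) (teaspoons_left : Int) (out : Int) : Prop := out = get_best_recipe_alt recipe_map recipes_remaining recipe_amounts five_hundred_calories teaspoons_left
instance (recipe_map : List (String × List Int)) (recipes_remaining : List String) (recipe_amounts : List (String × Int)) (five_hundred_calories : Bool) (teaspoons_left : Int) (out : Int) : Decidable (Spec_get_best_recipe recipe_map recipes_remaining recipe_amounts five_hundred_calories teaspoons_left out) := by unfold Spec_get_best_recipe; infer_instance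

-- ===== CLAIM (what is proved, stated in full; the proofs are below) =====
def Claim_equal_get_best_recipe : Prop := ∀ (recipe_map : List (String × List Int)) (recipes_remaining : List String) (recipe_amounts : List (String × Int)) (five_hundred_calories : Bool) (teaspoons_left : Int), Dom_get_best_recipe recipe_map recipes_remaining recipe_amounts five_hundred_calories teaspoons_left → Pre_get_best_recipe recipe_map recipes_remaining recipe_amounts five_hundred_calories teaspoons_left → Spec_get_best_recipe recipe_map recipes_remaining recipe_amounts five_hundred_calories teaspoons_left (get_best_recipe recipe_map recipes_remaining recipe_amounts five_hundred_calories teaspoons_left)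

-- ===== LEMMAS AND PROOFS =====
theorem optMax_assoc (a b c : Option Int) : optMax (optMax a b) c = optMax a (optMax b c) := by
  cases a <;> cases b <;> cases c <;> simp [optMax, max_assoc]

-- a fold of optMax can be restarted from none
theorem foldl_optMax_shift {α : Type} (g : α → Option Int) (l : List α) (acc : Option Int) :
    l.foldl (fun b z => optMax b (g z)) acc
      = optMax acc (l.foldl (fun b z => optMax b (g z)) none) := by
  induction l generalizing acc with
  | nil => cases acc <;> simp [optMax]
  | cons z l ih =>
      simp only [List.foldl_cons]
      rw [ih (optMax acc (g z)), ih (optMax none (g z))]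
      have h : optMax none (g z) = g z := rfl
      rw [h, optMax_assoc]

-- the heart of the equivalence: A's recursion equals B's fold over the allocation list
theorem gbr_eq_best (m : PySem.Dict String (List Int)) (flag : Bool) :
    ∀ (names : List String) (amts : PySem.Dict String Int) (t : Int),
      gbrA m flag names amts t = bestB m flag names amts t := by
  intro names
  induction names with
  | nil => intro amts t; simp [gbrA, bestB, allocations]
  | cons x rest ih =>
      intro amts t
      cases rest with
      | nil => simp [gbrA, bestB, allocations, List.foldl_cons, optMax]
      | cons y rest' =>
          simp only [gbrA, bestB, allocations]
          rw [List.foldl_flatMap]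
          congr 1
          funext acc i
          rw [ih (amts.insert x i) (t - i)]
          rw [List.foldl_map, foldl_optMax_shift]
          simp [bestB]

-- ===== VERDICT (by name: the statement is the Claim_ definition above) =====
theorem get_best_recipe_spec : Claim_equal_get_best_recipe := by
  intro rm names ra flag t _ _
  unfold Spec_get_best_recipe get_best_recipe get_best_recipe_alt
  rw [gbr_eq_best]
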